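-- pv_equiv track=rewrite | github.com/navotvolkgroundup/groundup-toolkit | skills/founder-scout/modules/scoring.py | calculate_timing_score
-- ===== SOURCE A (Python) =====
-- def _signal_types(signals):
--     """Extract set of signal_type strings from a list of signal dicts."""
--     return {str(s.get('signal_type', s.get('type', '')) or '').lower() for s in signals}
--
-- def _has_signal(signals, *keywords):
--     """Check if any signal's type or description contains one of the keywords."""
--     for s in signals:
--         text = ' '.join([
--             str(s.get('signal_type', s.get('type', '')) or ''),
--             str(s.get('description', '') or ''),
--         ]).lower()
--         for kw in keywords:
--             if kw.lower() in text:
--                 return True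
--     return False
--
-- def calculate_timing_score(person_data, signals):
--     """Returns (score, explanation_string).
--
--     Scoring:
--         Retention clock IMMINENT or EXPIRED  -> 90
--         Recently left company (< 3 months)   -> 80
--         Changed to vague title               -> 70
--         At estimated vesting boundary         -> 50
--         No timing signal                     -> 10
--     """
--     score = 10
--     explanation = 'No timing signal detected'
--
--     types = _signal_types(signals)
--
--     # Retention clock
--     if _has_signal(signals, 'retention_expired', 'retention expired'):
--         score, explanation = 90, 'Retention clock EXPIRED'
--     elif _has_signal(signals, 'retention_imminent', 'retention imminent'):
--         score, explanation = 90, 'Retention clock IMMINENT'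
--
--     # Recently left company
--     elif _has_signal(signals, 'left_company', 'left company', 'departed'):
--         # Check recency via signal date if available
--         score, explanation = 80, 'Recently left company'
--
--     # Vague title change
--     elif _has_signal(signals, 'vague_title', 'exploring', 'stealth', 'next chapter'):
--         score, explanation = 70, 'Changed to vague title (exploring/stealth)'
--
--     # Vesting boundary
--     elif _has_signal(signals, 'vesting_boundary', 'vesting cliff', 'cliff'):
--         score, explanation = 50, 'At estimated vesting boundary'
--
--     # Also check person_data notes for timing hints
--     notes = (person_data.get('notes') or '').lower()
--     if score == 10 and notes:
--         if any(kw in notes for kw in ['leaving', 'left', 'departed', 'last day']):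
--             score, explanation = 80, 'Recently left company (from notes)'
--         elif any(kw in notes for kw in ['exploring', 'stealth', 'next chapter']):
--             score, explanation = 70, 'Vague title detected in notes'
--
--     return score, explanation
-- ===== SOURCE B (Python) =====
-- def calculate_timing_score(person_data, signals):
--     # One pass over signals: OR-accumulate a boolean flag per keyword category,
--     # then pick (score, explanation) by the same priority order.
--     f_exp = f_imm = f_left = f_vague = f_vest = False
--     for s in signals:
--         text = ' '.join([
--             str(s.get('signal_type', s.get('type', '')) or ''),
--             str(s.get('description', '') or ''),
--         ]).lower()
--         f_exp = f_exp or any(kw in text for kw in ('retention_expired', 'retention expired'))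
--         f_imm = f_imm or any(kw in text for kw in ('retention_imminent', 'retention imminent'))
--         f_left = f_left or any(kw in text for kw in ('left_company', 'left company', 'departed'))
--         f_vague = f_vague or any(kw in text for kw in ('vague_title', 'exploring', 'stealth', 'next chapter'))
--         f_vest = f_vest or any(kw in text for kw in ('vesting_boundary', 'vesting cliff', 'cliff'))
--
--     if f_exp:
--         score, explanation = 90, 'Retention clock EXPIRED'
--     elif f_imm:
--         score, explanation = 90, 'Retention clock IMMINENT'
--     elif f_left:
--         score, explanation = 80, 'Recently left company'
--     elif f_vague:
--         score, explanation = 70, 'Changed to vague title (exploring/stealth)'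
--     elif f_vest:
--         score, explanation = 50, 'At estimated vesting boundary'
--     else:
--         score, explanation = 10, 'No timing signal detected'
--
--     notes = (person_data.get('notes') or '').lower()
--     if score == 10 and notes:
--         if any(kw in notes for kw in ['leaving', 'left', 'departed', 'last day']):
--             score, explanation = 80, 'Recently left company (from notes)'
--         elif any(kw in notes for kw in ['exploring', 'stealth', 'next chapter']):
--             score, explanation = 70, 'Vague title detected in notes'
--
--     return score, explanation
-- ===== Notes on version B (the rewrite author's own statement) =====
-- stated objective: alternative
-- what changed: B makes a single pass over signals, OR-accumulating one boolean flag per keyword category, and then selects (score, explanation) once by the same priority order, instead of A's five separate _has_signal scans over the signal list; the notes fallback is unchanged.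
import Mathlib
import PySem

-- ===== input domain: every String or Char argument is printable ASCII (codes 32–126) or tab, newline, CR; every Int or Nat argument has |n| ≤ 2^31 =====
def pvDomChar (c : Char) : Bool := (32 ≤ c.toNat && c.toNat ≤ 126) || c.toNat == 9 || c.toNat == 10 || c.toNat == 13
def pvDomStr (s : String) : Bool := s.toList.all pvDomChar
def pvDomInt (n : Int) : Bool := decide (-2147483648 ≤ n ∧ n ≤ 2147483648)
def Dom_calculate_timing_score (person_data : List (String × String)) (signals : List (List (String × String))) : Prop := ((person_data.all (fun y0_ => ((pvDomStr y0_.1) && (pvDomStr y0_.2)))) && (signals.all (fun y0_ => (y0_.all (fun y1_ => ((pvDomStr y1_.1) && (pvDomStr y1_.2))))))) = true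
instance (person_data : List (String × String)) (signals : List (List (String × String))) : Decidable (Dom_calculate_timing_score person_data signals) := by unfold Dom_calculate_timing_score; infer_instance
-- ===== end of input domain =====

-- B replaces A's five separate _has_signal scans by one pass that OR-accumulates a flag
-- per keyword category, then selects by the same priority order (objective: alternative).

-- ===== PORT A =====
-- s.get('signal_type', s.get('type', '')) etc.; 'or '' ' is the identity on strings, and
-- str() of a string is the string itself, so both are dropped in the port.
def pvGetStr (s : List (String × String)) (k : String) (d : String) : String :=
  PySem.Dict.getD (PySem.Dict.mk s) k d

def pvSigText (s : List (String × String)) : String :=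
  PySem.Str.lower (PySem.Str.join " " [pvGetStr s "signal_type" (pvGetStr s "type" ""), pvGetStr s "description" ""])

-- _has_signal: the nested for-loops with early 'return True' are exactly any-of-any on Bool
def pvHasSignal (signals : List (List (String × String))) (kws : List String) : Bool :=
  signals.any (fun s => kws.any (fun kw => PySem.Str.isIn (PySem.Str.lower kw) (pvSigText s)))

def calculate_timing_score (person_data : List (String × String)) (signals : List (List (String × String))) : Int × String :=
  let score : Int := 10
  let explanation : String := "No timing signal detected"
  -- types = _signal_types(signals) : computed by A and never used
  let _types : PySem.Set String :=
    PySem.Set.ofList (signals.map (fun s => PySem.Str.lower (pvGetStr s "signal_type" (pvGetStr s "type" ""))))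
  let se : Int × String :=
    if pvHasSignal signals ["retention_expired", "retention expired"] then (90, "Retention clock EXPIRED")
    else if pvHasSignal signals ["retention_imminent", "retention imminent"] then (90, "Retention clock IMMINENT")
    else if pvHasSignal signals ["left_company", "left company", "departed"] then (80, "Recently left company")
    else if pvHasSignal signals ["vague_title", "exploring", "stealth", "next chapter"] then (70, "Changed to vague title (exploring/stealth)")
    else if pvHasSignal signals ["vesting_boundary", "vesting cliff", "cliff"] then (50, "At estimated vesting boundary")
    else (score, explanation)
  let notes := PySem.Str.lower (pvGetStr person_data "notes" "")
  if se.1 == 10 && !(notes == "") then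
    if (["leaving", "left", "departed", "last day"]).any (fun kw => PySem.Str.isIn kw notes) then (80, "Recently left company (from notes)")
    else if (["exploring", "stealth", "next chapter"]).any (fun kw => PySem.Str.isIn kw notes) then (70, "Vague title detected in notes")
    else se
  else se

-- ===== PORT B =====
def pvStep (f : Bool × Bool × Bool × Bool × Bool) (s : List (String × String)) : Bool × Bool × Bool × Bool × Bool :=
  let text := pvSigText s
  (f.1 || (["retention_expired", "retention expired"]).any (fun kw => PySem.Str.isIn kw text),
   f.2.1 || (["retention_imminent", "retention imminent"]).any (fun kw => PySem.Str.isIn kw text),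
   f.2.2.1 || (["left_company", "left company", "departed"]).any (fun kw => PySem.Str.isIn kw text),
   f.2.2.2.1 || (["vague_title", "exploring", "stealth", "next chapter"]).any (fun kw => PySem.Str.isIn kw text),
   f.2.2.2.2 || (["vesting_boundary", "vesting cliff", "cliff"]).any (fun kw => PySem.Str.isIn kw text))

def calculate_timing_score_alt (person_data : List (String × String)) (signals : List (List (String × String))) : Int × String :=
  let f := signals.foldl pvStep (false, false, false, false, false)
  let se : Int × String :=
    if f.1 then (90, "Retention clock EXPIRED")
    else if f.2.1 then (90, "Retention clock IMMINENT")
    else if f.2.2.1 then (80, "Recently left company")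
    else if f.2.2.2.1 then (70, "Changed to vague title (exploring/stealth)")
    else if f.2.2.2.2 then (50, "At estimated vesting boundary")
    else (10, "No timing signal detected")
  let notes := PySem.Str.lower (pvGetStr person_data "notes" "")
  if se.1 == 10 && !(notes == "") then
    if (["leaving", "left", "departed", "last day"]).any (fun kw => PySem.Str.isIn kw notes) then (80, "Recently left company (from notes)")
    else if (["exploring", "stealth", "next chapter"]).any (fun kw => PySem.Str.isIn kw notes) then (70, "Vague title detected in notes")
    else se
  else se

-- ===== PRECONDITION & SPEC =====
def Spec_calculate_timing_score (person_data : List (String × String)) (signals : List (List (String × String))) (out : Int × String) : Prop := out = calculate_timing_score_alt person_data signals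
instance (person_data : List (String × String)) (signals : List (List (String × String))) (out : Int × String) : Decidable (Spec_calculate_timing_score person_data signals out) := by unfold Spec_calculate_timing_score; infer_instance

-- ===== CLAIM (what is proved, stated in full; the proofs are below) =====
def Claim_equal_calculate_timing_score : Prop := ∀ (person_data : List (String × String)) (signals : List (List (String × String))), Dom_calculate_timing_score person_data signals → Spec_calculate_timing_score person_data signals (calculate_timing_score person_data signals)

-- ===== LEMMAS AND PROOFS =====

-- B's fold computes, in each component, the OR of the per-signal category predicate
theorem pvFold_eq (signals : List (List (String × String))) (f : Bool × Bool × Bool × Bool × Bool) :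
    signals.foldl pvStep f =
      (f.1 || signals.any (fun s => (["retention_expired", "retention expired"]).any (fun kw => PySem.Str.isIn kw (pvSigText s))),
       f.2.1 || signals.any (fun s => (["retention_imminent", "retention imminent"]).any (fun kw => PySem.Str.isIn kw (pvSigText s))),
       f.2.2.1 || signals.any (fun s => (["left_company", "left company", "departed"]).any (fun kw => PySem.Str.isIn kw (pvSigText s))),
       f.2.2.2.1 || signals.any (fun s => (["vague_title", "exploring", "stealth", "next chapter"]).any (fun kw => PySem.Str.isIn kw (pvSigText s))),
       f.2.2.2.2 || signals.any (fun s => (["vesting_boundary", "vesting cliff", "cliff"]).any (fun kw => PySem.Str.isIn kw (pvSigText s)))) := by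
  induction signals generalizing f with
  | nil => simp
  | cons s rest ih => simp [List.foldl_cons, ih, pvStep, List.any_cons, Bool.or_assoc]

-- A lowercases each keyword; every keyword literal is already lowercase, so it is the identity
theorem pvHasSignal_eq (signals : List (List (String × String))) (kws : List String)
    (hk : ∀ kw ∈ kws, PySem.Str.lower kw = kw) :
    pvHasSignal signals kws = signals.any (fun s => kws.any (fun kw => PySem.Str.isIn kw (pvSigText s))) := by
  have inner : ∀ t : String, kws.any (fun kw => PySem.Str.isIn (PySem.Str.lower kw) t) = kws.any (fun kw => PySem.Str.isIn kw t) := by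
    intro t
    induction kws with
    | nil => simp only [List.any_nil]
    | cons k ks ih =>
      simp only [List.any_cons]
      rw [hk k (List.mem_cons_self ..), ih (fun kw h => hk kw (List.mem_cons_of_mem _ h))]
  unfold pvHasSignal
  simp only [inner]

-- ===== VERDICT (by name: the statement is the Claim_ definition above) =====
theorem calculate_timing_score_spec : Claim_equal_calculate_timing_score := by
  intro person_data signals _
  unfold Spec_calculate_timing_score calculate_timing_score calculate_timing_score_alt
  rw [pvFold_eq,
      pvHasSignal_eq signals ["retention_expired", "retention expired"] (by decide),
      pvHasSignal_eq signals ["retention_imminent", "retention imminent"] (by decide),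
      pvHasSignal_eq signals ["left_company", "left company", "departed"] (by decide),
      pvHasSignal_eq signals ["vague_title", "exploring", "stealth", "next chapter"] (by decide),
      pvHasSignal_eq signals ["vesting_boundary", "vesting cliff", "cliff"] (by decide)]
  simp only [Bool.false_or]
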